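-- pv_equiv track=rewrite | github.com/RiceDefender/CelebrityProfilingBachelorThesis | Models/HybridV4/analysis/mine_text_derived_semantic_features.py | count_terms
-- ===== SOURCE A (Python) =====
-- from collections import Counter, defaultdict
-- from typing import Any, Dict, Iterable, List, Optional, Sequence, Tuple
--
-- STOPWORDS = {
--     "a", "about", "above", "after", "again", "against", "all", "am", "an", "and", "any",
--     "are", "as", "at", "be", "because", "been", "before", "being", "below", "between",
--     "both", "but", "by", "can", "could", "did", "do", "does", "doing", "down", "during",
--     "each", "few", "for", "from", "further", "had", "has", "have", "having", "he", "her",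
--     "here", "hers", "herself", "him", "himself", "his", "how", "i", "if", "in", "into",
--     "is", "it", "its", "itself", "just", "me", "more", "most", "my", "myself", "no", "nor",
--     "not", "now", "of", "off", "on", "once", "only", "or", "other", "our", "ours", "ourselves",
--     "out", "over", "own", "same", "she", "should", "so", "some", "such", "than", "that",
--     "the", "their", "theirs", "them", "themselves", "then", "there", "these", "they", "this",
--     "those", "through", "to", "too", "under", "until", "up", "very", "was", "we", "were",
--     "what", "when", "where", "which", "while", "who", "whom", "why", "will", "with", "you",
--     "your", "yours", "yourself", "yourselves", "rt", "http", "https", "amp", "com", "www",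
--     "tco", "via", "get", "got", "one", "two", "new", "like", "also", "would", "really",
--     "much", "many", "today", "tomorrow", "yesterday", "time", "day", "year", "years",
-- }
--
-- def build_ngrams(tokens: Sequence[str], n: int) -> Iterable[str]:
--     if n <= 1:
--         yield from tokens
--         return
--     for i in range(0, max(0, len(tokens) - n + 1)):
--         gram = tokens[i : i + n]
--         if any(t in STOPWORDS for t in gram):
--             continue
--         yield " ".join(gram)
--
-- def count_terms(rows: Sequence[Dict[str, Any]], ngram_range: Tuple[int, int]) -> Tuple[Counter, int, int]:
--     counts: Counter = Counter()
--     token_total = 0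
--     doc_total = 0
--     for row in rows:
--         toks = row.get("tokens_list") or []
--         if not toks:
--             continue
--         doc_total += 1
--         token_total += len(toks)
--         for n in range(ngram_range[0], ngram_range[1] + 1):
--             counts.update(build_ngrams(toks, n))
--     return counts, token_total, doc_total
-- ===== SOURCE B (Python) =====
-- from collections import Counter
--
-- STOPWORDS = frozenset(
--     "a about above after again against all am an and any are as at be because been before being".split()
--     + "below between both but by can could did do does doing down during each few for from further had".split()
--     + "has have having he her here hers herself him himself his how i if in into is it its".split()
--     + "itself just me more most my myself no nor not now of off on once only or other our".split()
--     + "ours ourselves out over own same she should so some such than that the their theirs them themselves then".split()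
--     + "there these they this those through to too under until up very was we were what when where which".split()
--     + "while who whom why will with you your yours yourself yourselves rt http https amp com www tco via".split()
--     + "get got one two new like also would really much many today tomorrow yesterday time day year years".split()
-- )
--
--
-- def count_terms(rows, ngram_range):
--     lo, hi = ngram_range
--     docs = [toks for toks in (row.get("tokens_list") or [] for row in rows) if toks]
--     grams = []
--     for toks in docs:
--         pref = [0]
--         s = 0
--         for t in toks:
--             s += t in STOPWORDS
--             pref.append(s)
--         for n in range(lo, hi + 1):
--             if n <= 1:
--                 grams += toks
--             else:
--                 grams += [" ".join(toks[i:i + n])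
--                           for i in range(len(toks) - n + 1)
--                           if pref[i + n] == pref[i]]
--     return Counter(grams), sum(len(t) for t in docs), len(docs)
-- ===== Notes on version B (the rewrite author's own statement) =====
-- stated objective: alternative
-- what changed: B streams all accepted grams of all documents into one list -- accepting an n-gram window by comparing two entries of a per-document prefix-sum over a 0/1 stopword mask instead of rescanning every window -- and counts that list once at the end with a single Counter(grams), instead of A's per-window any()-rescan and incremental counts.update per n per document.
import Mathlib
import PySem

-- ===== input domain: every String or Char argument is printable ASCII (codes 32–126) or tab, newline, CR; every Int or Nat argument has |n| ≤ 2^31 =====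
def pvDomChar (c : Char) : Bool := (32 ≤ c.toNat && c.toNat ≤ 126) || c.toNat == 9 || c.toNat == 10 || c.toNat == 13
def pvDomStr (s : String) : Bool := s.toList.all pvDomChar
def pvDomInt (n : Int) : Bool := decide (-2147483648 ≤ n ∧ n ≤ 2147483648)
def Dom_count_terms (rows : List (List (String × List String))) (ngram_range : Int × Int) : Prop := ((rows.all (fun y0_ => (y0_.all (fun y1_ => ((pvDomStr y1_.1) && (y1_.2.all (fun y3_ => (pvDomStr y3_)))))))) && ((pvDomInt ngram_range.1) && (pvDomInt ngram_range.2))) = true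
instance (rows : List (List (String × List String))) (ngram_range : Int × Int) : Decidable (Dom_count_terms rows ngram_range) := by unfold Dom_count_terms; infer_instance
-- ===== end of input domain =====

-- B replaces A's per-window stopword rescan and incremental Counter updates by a stream-then-count
-- design: it collects every emitted gram into one list (accepting an n-gram window by a prefix-sum
-- comparison over a 0/1 stopword mask) and counts the list once at the end (alternative; same value proved).

-- ===== PORT A =====
-- the module-level STOPWORDS set literal
def pvStopL : List String := ["a", "about", "above", "after", "again", "against", "all", "am", "an", "and", "any", "are", "as", "at", "be", "because", "been", "before", "being", "below", "between", "both", "but", "by", "can", "could", "did", "do", "does", "doing", "down", "during", "each", "few", "for", "from", "further", "had", "has", "have", "having", "he", "her", "here", "hers", "herself", "him", "himself", "his", "how", "i", "if", "in", "into", "is", "it", "its", "itself", "just", "me", "more", "most", "my", "myself", "no", "nor", "not", "now", "of", "off", "on", "once", "only", "or", "other", "our", "ours", "ourselves", "out", "over", "own", "same", "she", "should", "so", "some", "such", "than", "that", "the", "their", "theirs", "them", "themselves", "then", "there", "these", "they", "this", "those", "through", "to", "too", "under", "until", "up", "very", "was", "we", "were", "what", "when", "where", "which", "while", "who", "whom",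 "why", "will", "with", "you", "your", "yours", "yourself", "yourselves", "rt", "http", "https", "amp", "com", "www", "tco", "via", "get", "got", "one", "two", "new", "like", "also", "would", "really", "much", "many", "today", "tomorrow", "yesterday", "time", "day", "year", "years"]

def pvSTOP : PySem.Set String := PySem.Set.ofList pvStopL

-- 't in STOPWORDS'
def pvIsStop (t : String) : Bool := PySem.Set.contains pvSTOP t

-- 'row.get("tokens_list") or []'  (a present-but-empty list is falsy, same as the default)
def pvGetToks (row : List (String × List String)) : List String :=
  (PySem.Dict.get? (PySem.Dict.mk row) "tokens_list").getD []

-- 'counts.update(iterable)'  (Counter: counts[g] += 1 for each g)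
def pvCountUp (c : PySem.Dict String Int) (gs : List String) : PySem.Dict String Int :=
  gs.foldl (fun d g => PySem.Dict.modify d g 0 (· + 1)) c

def build_ngrams (tokens : List String) (n : Int) : List String :=
  if n ≤ 1 then tokens
  else
    (PySem.List.pyRange 0 (max 0 ((tokens.length : Int) - n + 1)) 1).foldl
      (fun acc i =>
        let gram := PySem.List.slice tokens (some i) (some (i + n))
        if gram.any pvIsStop then acc
        else acc ++ [PySem.Str.join " " gram])
      []

def count_terms (rows : List (List (String × List String))) (ngram_range : Int × Int) :
    (List (String × Int)) × Int × Int :=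
  let fin := rows.foldl
    (fun (st : PySem.Dict String Int × Int × Int) row =>
      let toks := pvGetToks row
      if toks = [] then st
      else
        ((PySem.List.pyRange ngram_range.1 (ngram_range.2 + 1) 1).foldl
            (fun c n => pvCountUp c (build_ngrams toks n)) st.1,
         st.2.1 + (toks.length : Int),
         st.2.2 + 1))
    (PySem.Dict.empty, 0, 0)
  (fin.1.items, fin.2.1, fin.2.2)

-- ===== PORT B =====
-- B's STOPWORDS = frozenset("…".split() + …): whitespace-split word chunks
def pvStops : List String :=
  PySem.Str.split₀ "a about above after again against all am an and any are as at be because been before being"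
    ++ PySem.Str.split₀ "below between both but by can could did do does doing down during each few for from further had"
    ++ PySem.Str.split₀ "has have having he her here hers herself him himself his how i if in into is it its"
    ++ PySem.Str.split₀ "itself just me more most my myself no nor not now of off on once only or other our"
    ++ PySem.Str.split₀ "ours ourselves out over own same she should so some such than that the their theirs them themselves then"
    ++ PySem.Str.split₀ "there these they this those through to too under until up very was we were what when where which"
    ++ PySem.Str.split₀ "while who whom why will with you your yours yourself yourselves rt http https amp com www tco via"
    ++ PySem.Str.split₀ "get got one two new like also would really much many today tomorrow yesterday time day year years"

-- 'row.get("tokens_list") or []' read directly off the association list: first matching key wins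
-- (exact under the dict-as-assoc-list convention: lookup = first match, missing key = default [])
def pvLookupToks : List (String × List String) → List String
  | [] => []
  | (k, v) :: rest => if k == "tokens_list" then v else pvLookupToks rest

-- pref = [0]; s = 0; for t in toks: s += t in STOPWORDS; pref.append(s)
def pvPrefix (toks : List String) : List Int :=
  (toks.foldl
    (fun (ps : List Int × Int) t =>
      let s := ps.2 + (if pvStops.contains t then 1 else 0)
      (ps.1 ++ [s], s))
    ([0], 0)).1

-- [" ".join(toks[i:i+n]) for i in range(len(toks)-n+1) if pref[i+n] == pref[i]]
-- (pref[·] is always in range for the generated i, so pyGetD … 0 is exact)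
def pvDocGrams (pref : List Int) (toks : List String) (n : Int) : List String :=
  ((PySem.List.pyRange 0 ((toks.length : Int) - n + 1) 1).filter
      (fun i => PySem.List.pyGetD pref (i + n) 0 == PySem.List.pyGetD pref i 0)).map
    (fun i => PySem.Str.join " " (PySem.List.slice toks (some i) (some (i + n))))

-- all grams one document streams into 'grams' (the whole n-loop of one document)
def pvDocAll (toks : List String) (lo hi : Int) : List String :=
  let pref := pvPrefix toks
  (PySem.List.pyRange lo (hi + 1) 1).flatMap
    (fun n => if n ≤ 1 then toks else pvDocGrams pref toks n)

def count_terms_alt (rows : List (List (String × List String))) (ngram_range : Int × Int) :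
    (List (String × Int)) × Int × Int :=
  let docs := (rows.map pvLookupToks).filter (fun toks => !toks.isEmpty)
  let grams := docs.flatMap (fun toks => pvDocAll toks ngram_range.1 ngram_range.2)
  ((PySem.Dict.counter grams).items,
   (docs.map (fun toks => (toks.length : Int))).sum,
   (docs.length : Int))

-- ===== PRECONDITION & SPEC =====
def Spec_count_terms (rows : List (List (String × List String))) (ngram_range : Int × Int) (out : (List (String × Int)) × Int × Int) : Prop := out = count_terms_alt rows ngram_range
instance (rows : List (List (String × List String))) (ngram_range : Int × Int) (out : (List (String × Int)) × Int × Int) : Decidable (Spec_count_terms rows ngram_range out) := by unfold Spec_count_terms; infer_instance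

-- ===== CLAIM (what is proved, stated in full; the proofs are below) =====
def Claim_equal_count_terms : Prop := ∀ (rows : List (List (String × List String))) (ngram_range : Int × Int), Dom_count_terms rows ngram_range → Spec_count_terms rows ngram_range (count_terms rows ngram_range)

-- ===== LEMMAS AND PROOFS =====

-- B's chunk-split stopword list is A's set literal, word for word
set_option maxRecDepth 40000 in
theorem pvStops_eq : pvStops = pvStopL := by decide

-- the two membership tests agree
set_option maxRecDepth 40000 in
theorem isStop_eq (t : String) : pvStops.contains t = pvIsStop t := by
  have h1 : pvSTOP = pvStopL := by
    have := PySem.Set.ofList_eq_self_of_nodup (xs := pvStopL) (by decide)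
    rw [pvSTOP, this]
  simp [pvIsStop, h1, pvStops_eq]

-- B's assoc-list lookup is A's dict lookup (first match; [] when missing)
theorem lookup_eq (row : List (String × List String)) : pvLookupToks row = pvGetToks row := by
  induction row with
  | nil => rfl
  | cons kv rest ih =>
    obtain ⟨k, v⟩ := kv
    rw [pvLookupToks, pvGetToks, PySem.Dict.get?_mk_cons]
    by_cases h : k == "tokens_list"
    · simp [h]
    · simp [h]; exact ih

-- pvPrefix toks lists the stopword counts of all prefixes of toks
set_option maxRecDepth 4096 in
theorem pvPrefix_aux (toks : List String) (ps : List Int) (s : Int) :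
    (toks.foldl
      (fun (ps : List Int × Int) t =>
        let s := ps.2 + (if pvIsStop t then 1 else 0)
        (ps.1 ++ [s], s))
      (ps, s)).1
    = ps ++ (List.range toks.length).map
        (fun j => s + (((toks.take (j+1)).countP pvIsStop : Nat) : Int)) := by
  induction toks generalizing ps s with
  | nil => simp
  | cons t ts ih =>
    simp only [List.foldl_cons, ih]
    rw [List.length_cons, List.range_succ_eq_map]
    simp [List.map_map, Function.comp, List.countP_cons, List.append_assoc]
    intro a ha
    ring

theorem pvPrefix_eq (toks : List String) :
    pvPrefix toks
      = (List.range (toks.length + 1)).map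
          (fun j => (((toks.take j).countP pvIsStop : Nat) : Int)) := by
  rw [pvPrefix]
  simp only [isStop_eq]
  rw [pvPrefix_aux, List.range_succ_eq_map]
  simp

-- reading pvPrefix at a valid index
theorem pvPrefix_get (toks : List String) (j : Nat) (hj : j ≤ toks.length) :
    PySem.List.pyGetD (pvPrefix toks) (j : Int) 0
      = ((toks.take j).countP pvIsStop : Int) := by
  rw [PySem.List.pyGetD_natCast, pvPrefix_eq]
  rw [List.getD_eq_getElem?_getD, List.getElem?_map, List.getElem?_range (by omega)]
  rfl

-- range(0, max(0, x)) = range(0, x)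
theorem pyRange_max0 (x : Int) : PySem.List.pyRange 0 (max 0 x) 1 = PySem.List.pyRange 0 x 1 := by
  by_cases h : x ≤ 0
  · rw [PySem.List.pyRange_one_eq_nil (by omega), PySem.List.pyRange_one_eq_nil (by omega)]
  · rw [max_eq_right (by omega)]

-- the prefix-sum window test selects exactly the stopword-free windows of build_ngrams
theorem build_ngrams_eq (toks : List String) (n : Int) :
    build_ngrams toks n = if n ≤ 1 then toks else pvDocGrams (pvPrefix toks) toks n := by
  by_cases h : n ≤ 1
  · simp [build_ngrams, h]
  · simp only [build_ngrams, pvDocGrams, if_neg h]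
    have hb : (fun (acc : List String) (i : Int) =>
        let gram := PySem.List.slice toks (some i) (some (i + n))
        if gram.any pvIsStop then acc
        else acc ++ [PySem.Str.join " " gram])
      = (fun (acc : List String) (i : Int) =>
        if (!(PySem.List.slice toks (some i) (some (i + n))).any pvIsStop) = true
        then acc ++ [PySem.Str.join " " (PySem.List.slice toks (some i) (some (i + n)))]
        else acc) := by
      funext acc i
      cases hx : (PySem.List.slice toks (some i) (some (i + n))).any pvIsStop <;> simp [hx]
    rw [hb, PySem.List.foldl_append_if, List.nil_append, pyRange_max0]
    congr 1
    apply List.filter_congr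
    intro i hi
    rw [PySem.List.mem_pyRange_one] at hi
    obtain ⟨hi0, hiM⟩ := hi
    obtain ⟨j, rfl⟩ : ∃ j : Nat, i = (j : Int) := ⟨i.toNat, (Int.toNat_of_nonneg hi0).symm⟩
    obtain ⟨m, rfl⟩ : ∃ m : Nat, n = (m : Int) := ⟨n.toNat, (Int.toNat_of_nonneg (by omega)).symm⟩
    have hjm : j + m ≤ toks.length := by omega
    rw [show ((j : Int) + (m : Int)) = ((j + m : Nat) : Int) by push_cast; ring] at *
    rw [pvPrefix_get toks (j + m) hjm, pvPrefix_get toks j (by omega)]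
    rw [show (some ((j + m : Nat) : Int)) = some ((j : Int) + (m : Int)) by push_cast; ring_nf]
    rw [PySem.List.slice_natCast_add]
    rw [List.take_add, List.countP_append]
    cases hx : ((toks.drop j).take m).any pvIsStop with
    | false =>
      have h0 : ((toks.drop j).take m).countP pvIsStop = 0 :=
        List.countP_eq_zero.mpr (by simpa [List.any_eq_false] using hx)
      simp [h0]
    | true =>
      have h0 : ((toks.drop j).take m).countP pvIsStop ≠ 0 := by
        obtain ⟨x, hxm, hxp⟩ := List.any_eq_true.mp hx
        have := List.countP_pos_iff.mpr ⟨x, hxm, hxp⟩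
        omega
      simp only [Bool.not_true]
      have h' : ((List.countP pvIsStop (List.take j toks)
            + List.countP pvIsStop (List.take m (List.drop j toks)) : Nat) : Int)
          ≠ ((List.countP pvIsStop (List.take j toks) : Nat) : Int) := by
        push_cast; omega
      exact (beq_eq_false_iff_ne.mpr h').symm

-- folding over a flatMap is folding each block in turn
theorem foldl_flatMap {α β γ : Type} (l : List α) (g : α → List β) (f : γ → β → γ) (init : γ) :
    (l.flatMap g).foldl f init = l.foldl (fun acc x => (g x).foldl f acc) init := by
  induction l generalizing init with
  | nil => rfl
  | cons x xs ih => rw [List.flatMap_cons, List.foldl_append, List.foldl_cons, ih]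

-- one document's whole n-loop of A is one fold over B's streamed gram list
theorem doc_fold_eq (toks : List String) (ng : Int × Int) (c : PySem.Dict String Int) :
    (PySem.List.pyRange ng.1 (ng.2 + 1) 1).foldl
        (fun c n => pvCountUp c (build_ngrams toks n)) c
      = (pvDocAll toks ng.1 ng.2).foldl (fun d g => PySem.Dict.modify d g 0 (· + 1)) c := by
  rw [pvDocAll, foldl_flatMap]
  apply PySem.List.foldl_congr_mem
  intro acc n _
  rw [build_ngrams_eq, pvCountUp]

-- the whole row loop of A against B's map/filter decomposition over documents
theorem outer_fold_eq (ng : Int × Int) (rows : List (List (String × List String)))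
    (c : PySem.Dict String Int) (t d : Int) :
    rows.foldl
      (fun (st : PySem.Dict String Int × Int × Int) row =>
        let toks := pvGetToks row
        if toks = [] then st
        else
          ((PySem.List.pyRange ng.1 (ng.2 + 1) 1).foldl
              (fun c n => pvCountUp c (build_ngrams toks n)) st.1,
           st.2.1 + (toks.length : Int),
           st.2.2 + 1))
      (c, t, d)
    = (((rows.map pvGetToks).filter (fun toks => !toks.isEmpty)).foldl
          (fun c toks => (pvDocAll toks ng.1 ng.2).foldl
            (fun d g => PySem.Dict.modify d g 0 (· + 1)) c) c,
       t + (((rows.map pvGetToks).filter (fun toks => !toks.isEmpty)).map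
              (fun toks => (toks.length : Int))).sum,
       d + ((rows.map pvGetToks).filter (fun toks => !toks.isEmpty)).length) := by
  induction rows generalizing c t d with
  | nil => simp
  | cons row rest ih =>
    simp only [List.foldl_cons, List.map_cons, List.filter_cons]
    by_cases h : pvGetToks row = []
    · simp only [h, List.isEmpty_nil, Bool.not_true]
      simpa using ih c t d
    · have hne : (!(pvGetToks row).isEmpty) = true := by
        simp [h]
      simp only [if_neg h, hne, if_pos]
      rw [ih]
      simp only [List.foldl_cons, List.map_cons, List.sum_cons, List.length_cons]
      rw [doc_fold_eq (pvGetToks row) ng c]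
      simp only [Prod.mk.injEq]
      exact ⟨trivial, by ring, by push_cast; ring⟩

-- ===== VERDICT (by name: the statement is the Claim_ definition above) =====
theorem count_terms_spec : Claim_equal_count_terms := by
  intro rows ng _
  unfold Spec_count_terms count_terms count_terms_alt
  rw [outer_fold_eq ng rows PySem.Dict.empty 0 0]
  rw [show pvLookupToks = pvGetToks from funext lookup_eq]
  simp only [PySem.Dict.counter_eq_foldl, foldl_flatMap]
  simp
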